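-- pv_equiv track=rewrite | github.com/ludwigpeking/theLastDayOfAIs | merge_tech_tree.py | split_js_objects
-- ===== SOURCE A (Python) =====
-- def split_js_objects(s):
--     """Split a JS array body into individual top-level object strings."""
--     objects = []
--     depth = 0
--     start = None
--     i = 0
--     while i < len(s):
--         c = s[i]
--         if c == '{':
--             if depth == 0:
--                 start = i
--             depth += 1
--         elif c == '}':
--             depth -= 1
--             if depth == 0 and start is not None:
--                 objects.append(s[start:i+1])
--                 start = None
--         elif c in ("'", '"'):
--             # skip string
--             quote = c
--             i += 1
--             while i < len(s):
--                 c2 = s[i]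
--                 if c2 == '\\':
--                     i += 2
--                     continue
--                 if c2 == quote:
--                     break
--                 i += 1
--         i += 1
--     return objects
-- ===== SOURCE B (Python) =====
-- def split_js_objects(s):
--     """Split a JS array body into individual top-level object strings."""
--     objects = []
--     depth = 0
--     start = 0
--     in_string = False
--     quote = ''
--     escape_next = False
--     for i in range(len(s)):
--         c = s[i]
--         if in_string:
--             if escape_next:
--                 escape_next = False
--             elif c == '\\':
--                 escape_next = True
--             elif c == quote:
--                 in_string = False
--         elif c == '{':
--             if depth == 0:
--                 start = i
--             depth += 1
--         elif c == '}':
--             depth -= 1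
--             if depth == 0:
--                 objects.append(s[start:i+1])
--         elif c in ("'", '"'):
--             in_string = True
--             quote = c
--             escape_next = False
--     return objects
-- ===== Notes on version B (the rewrite author's own statement) =====
-- stated objective: simpler
-- what changed: Replaced A's nested while loops (inner loop that skips strings with i+=2 escape jumps and an Optional start sentinel) by a flat single-pass for-loop state machine with in_string/escape_next booleans and a plain integer start.
import Mathlib
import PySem

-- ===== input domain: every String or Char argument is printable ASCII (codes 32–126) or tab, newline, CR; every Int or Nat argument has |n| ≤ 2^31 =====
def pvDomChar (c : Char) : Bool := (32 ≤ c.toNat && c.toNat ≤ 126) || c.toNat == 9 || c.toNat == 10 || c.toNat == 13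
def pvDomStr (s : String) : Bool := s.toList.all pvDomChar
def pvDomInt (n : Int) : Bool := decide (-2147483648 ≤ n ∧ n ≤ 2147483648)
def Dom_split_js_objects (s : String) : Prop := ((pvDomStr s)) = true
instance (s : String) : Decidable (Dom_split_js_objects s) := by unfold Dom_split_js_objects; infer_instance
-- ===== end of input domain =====

-- B is a flat single-pass state machine (booleans instead of A's nested string-skipping loop); return value only, no mutation.

-- s[a:b] for 0 ≤ a ≤ b ≤ len: exactly drop/take (both ports call it only with in-range bounds)
def pvSlice (cs : List Char) (a b : Nat) : String := String.ofList ((cs.drop a).take (b - a))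

-- ===== PORT A =====
-- inner `while` loop of A: returns the index at which the loop exits (break on quote, or ≥ len).
-- fuel only makes the loop total; every call below has enough fuel (the index grows every step).
def innerA (cs : List Char) (q : Char) : Nat → Nat → Nat
  | 0, i => i
  | f + 1, i =>
    if h : i < cs.length then
      if cs[i] = '\\' then innerA cs q f (i + 2)
      else if cs[i] = q then i
      else innerA cs q f (i + 1)
    else i

-- outer `while` loop of A (fuel likewise; i grows by at least 1 each iteration)
def outerA (cs : List Char) : Nat → Nat → Int → Option Nat → List String → List String
  | 0, _, _, _, acc => acc
  | f + 1, i, depth, start, acc =>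
    if h : i < cs.length then
      if cs[i] = '{' then
        outerA cs f (i + 1) (depth + 1) (if depth = 0 then some i else start) acc
      else if cs[i] = '}' then
        -- `if depth == 0 and start is not None:`; start.getD 0 is only reached with start ≠ none
        if depth - 1 = 0 ∧ ¬ start = none then
          outerA cs f (i + 1) (depth - 1) none (acc ++ [pvSlice cs (start.getD 0) (i + 1)])
        else outerA cs f (i + 1) (depth - 1) start acc
      else if cs[i] = '\'' ∨ cs[i] = '"' then
        -- skip string: the inner loop, then the outer i += 1
        outerA cs f (innerA cs cs[i] (cs.length + 1) (i + 1) + 1) depth start acc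
      else
        outerA cs f (i + 1) depth start acc
    else acc

def split_js_objects (s : String) : List String :=
  outerA s.toList s.toList.length 0 0 none []

-- ===== PORT B =====
-- the single flat `for i in range(len(s))` loop of B, structural over the remaining characters
def bLoop (cs : List Char) : List Char → Nat → Bool → Char → Bool → Int → Nat → List String → List String
  | [], _, _, _, _, _, _, acc => acc
  | c :: rest, i, inStr, q, esc, depth, start, acc =>
    if inStr then
      if esc then bLoop cs rest (i + 1) true q false depth start acc
      else if c = '\\' then bLoop cs rest (i + 1) true q true depth start acc
      else if c = q then bLoop cs rest (i + 1) false q esc depth start acc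
      else bLoop cs rest (i + 1) true q esc depth start acc
    else if c = '{' then
      bLoop cs rest (i + 1) false q esc (depth + 1) (if depth = 0 then i else start) acc
    else if c = '}' then
      bLoop cs rest (i + 1) false q esc (depth - 1) start
        (if depth - 1 = 0 then acc ++ [pvSlice cs start (i + 1)] else acc)
    else if c = '\'' ∨ c = '"' then
      bLoop cs rest (i + 1) true c false depth start acc
    else
      bLoop cs rest (i + 1) false q esc depth start acc

def split_js_objects_alt (s : String) : List String :=
  bLoop s.toList s.toList 0 false ' ' false 0 0 []

-- ===== PRECONDITION & SPEC =====
def Spec_split_js_objects (s : String) (out : List String) : Prop := out = split_js_objects_alt s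
instance (s : String) (out : List String) : Decidable (Spec_split_js_objects s out) := by unfold Spec_split_js_objects; infer_instance

-- ===== CLAIM (what is proved, stated in full; the proofs are below) =====
def Claim_equal_split_js_objects : Prop := ∀ (s : String), Dom_split_js_objects s → Spec_split_js_objects s (split_js_objects s)

-- ===== LEMMAS AND PROOFS =====

theorem innerA_ge (cs : List Char) (q : Char) :
    ∀ f i, i ≤ innerA cs q f i := by
  intro f
  induction f with
  | zero => intro i; exact le_refl i
  | succ f ih =>
      intro i
      simp only [innerA]
      split
      · split
        · exact le_trans (by omega) (ih (i + 2))
        · split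
          · exact le_refl i
          · exact le_trans (by omega) (ih (i + 1))
      · exact le_refl i

-- past the end the remaining-character list is empty, so bLoop returns acc
theorem bLoop_oob (cs : List Char) (i : Nat) (hi : cs.length ≤ i) (inStr : Bool) (q : Char)
    (esc : Bool) (depth : Int) (start : Nat) (acc : List String) :
    bLoop cs (cs.drop i) i inStr q esc depth start acc = acc := by
  rw [List.drop_eq_nil_of_le hi]
  rfl

-- an escape consumes exactly the next character
theorem bLoop_esc (cs : List Char) (i : Nat) (q : Char) (depth : Int) (start : Nat)
    (acc : List String) :
    bLoop cs (cs.drop i) i true q true depth start acc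
      = bLoop cs (cs.drop (i + 1)) (i + 1) true q false depth start acc := by
  by_cases h : i < cs.length
  · rw [List.drop_eq_getElem_cons h]
    simp only [bLoop]
    simp
  · rw [bLoop_oob cs i (by omega), bLoop_oob cs (i + 1) (by omega)]

-- B in string-skipping mode follows A's inner loop exactly
theorem bLoop_string (cs : List Char) (q : Char) :
    ∀ f i depth start acc, cs.length - i ≤ f →
    bLoop cs (cs.drop i) i true q false depth start acc
      = bLoop cs (cs.drop (innerA cs q f i + 1)) (innerA cs q f i + 1) false q false depth start acc := by
  intro f
  induction f with
  | zero =>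
      intro i depth start acc hm
      simp only [innerA]
      rw [bLoop_oob cs i (by omega), bLoop_oob cs (i + 1) (by omega)]
  | succ f ih =>
      intro i depth start acc hm
      by_cases h : i < cs.length
      · rw [List.drop_eq_getElem_cons h]
        simp only [bLoop, innerA, dif_pos h]
        by_cases hb : cs[i] = '\\'
        · rw [if_pos hb, if_pos hb]
          simp only [if_neg (by simp : ¬ (false = true))]
          rw [bLoop_esc]
          exact ih (i + 2) depth start acc (by omega)
        · rw [if_neg hb, if_neg hb]
          by_cases hq : cs[i] = q
          · rw [if_pos hq, if_pos hq]
            simp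
          · rw [if_neg hq, if_neg hq]
            simp only [if_neg (by simp : ¬ (false = true))]
            exact ih (i + 1) depth start acc (by omega)
      · rw [bLoop_oob cs i (by omega)]
        simp only [innerA, dif_neg h]
        rw [bLoop_oob cs (i + 1) (by omega)]

-- main simulation: outside strings, A's outer loop and B's flat loop agree,
-- under the invariant relating A's Optional start to B's integer start
theorem outer_eq_bLoop (cs : List Char) :
    ∀ f i depth (start : Option Nat) (start' : Nat) acc (q : Char) (esc : Bool),
    cs.length - i ≤ f →
    (1 ≤ depth → start = some start') →
    (depth ≤ 0 → start = none) →
    outerA cs f i depth start acc = bLoop cs (cs.drop i) i false q esc depth start' acc := by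
  intro f
  induction f with
  | zero =>
      intro i depth start start' acc q esc hm h1 h2
      simp only [outerA]
      rw [bLoop_oob cs i (by omega)]
  | succ f ih =>
      intro i depth start start' acc q esc hm h1 h2
      by_cases h : i < cs.length
      · rw [List.drop_eq_getElem_cons h]
        simp only [outerA, bLoop, dif_pos h]
        simp only [if_neg (by simp : ¬ (false = true))]
        by_cases hob : cs[i] = '{'
        · rw [if_pos hob, if_pos hob]
          by_cases hd : depth = 0
          · rw [if_pos hd, if_pos hd]
            exact ih (i + 1) (depth + 1) (some i) i acc q esc (by omega)
              (fun _ => rfl) (fun hle => absurd hle (by omega))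
          · rw [if_neg hd, if_neg hd]
            by_cases hd1 : 1 ≤ depth
            · rw [h1 hd1]
              exact ih (i + 1) (depth + 1) (some start') start' acc q esc (by omega)
                (fun _ => rfl) (fun hle => absurd hle (by omega))
            · rw [h2 (by omega)]
              exact ih (i + 1) (depth + 1) none start' acc q esc (by omega)
                (fun hge => absurd hge (by omega)) (fun _ => rfl)
        · rw [if_neg hob, if_neg hob]
          by_cases hcb : cs[i] = '}'
          · rw [if_pos hcb, if_pos hcb]
            cases hst : start with
            | some p =>
                have hd1 : 1 ≤ depth := by
                  by_contra hc
                  have := h2 (by omega)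
                  rw [hst] at this; cases this
                have hp : p = start' := by
                  have := h1 hd1; rw [hst] at this; injection this
                rw [hp]
                by_cases hz : depth - 1 = 0
                · rw [if_pos (show depth - 1 = 0 ∧ ¬ (some start' = none) from
                    ⟨hz, by simp⟩), if_pos hz]
                  exact ih (i + 1) (depth - 1) none start' (acc ++ [pvSlice cs start' (i + 1)])
                    q esc (by omega) (fun hge => absurd hge (by omega)) (fun _ => rfl)
                · rw [if_neg (fun hc => hz hc.1), if_neg hz]
                  exact ih (i + 1) (depth - 1) (some start') start' acc q esc (by omega)
                    (fun _ => rfl) (fun hle => absurd hle (by omega))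
            | none =>
                have hd0 : depth ≤ 0 := by
                  by_contra hc
                  have := h1 (by omega)
                  rw [hst] at this; cases this
                have hz : ¬ (depth - 1 = 0) := by omega
                rw [if_neg (fun hc => hz hc.1), if_neg hz]
                exact ih (i + 1) (depth - 1) none start' acc q esc (by omega)
                  (fun hge => absurd hge (by omega)) (fun _ => rfl)
          · rw [if_neg hcb, if_neg hcb]
            by_cases hqt : cs[i] = '\'' ∨ cs[i] = '"'
            · rw [if_pos hqt, if_pos hqt]
              rw [bLoop_string cs cs[i] (cs.length + 1) (i + 1) depth start' acc (by omega)]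
              have hj := innerA_ge cs cs[i] (cs.length + 1) (i + 1)
              exact ih (innerA cs cs[i] (cs.length + 1) (i + 1) + 1) depth start start' acc
                cs[i] false (by omega) h1 h2
            · rw [if_neg hqt, if_neg hqt]
              exact ih (i + 1) depth start start' acc q esc (by omega) h1 h2
      · simp only [outerA, dif_neg h]
        rw [bLoop_oob cs i (by omega)]

-- ===== VERDICT (by name: the statement is the Claim_ definition above) =====
theorem split_js_objects_spec : Claim_equal_split_js_objects := by
  intro s _
  unfold Spec_split_js_objects split_js_objects split_js_objects_alt
  rw [outer_eq_bLoop s.toList s.toList.length 0 0 none 0 [] ' ' false (by omega)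
    (fun hge => absurd hge (by omega)) (fun _ => rfl)]
  rfl
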